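/-
  THE UNKNOWN STREAM IS NOT IN THE USER RELATION.

  A value the manuals leave undefined is a draw from the machine's stream of UNKNOWN bits (`Sem.unknownBit`, X86/Sem/Basic.lean). In the
  model this package is pinned to (model-snapshot/: tag v3-userfix-b) the stream is the field `Machine.oracle : Nat → Bool`, read at position
  `oracleIdx`; in the model as it is today the same field is called `unknownBits`. A run never changes the stream (it is in
  `Machine.sysPart`), so which stream a machine starts with is a parameter of the whole run: the processor's answer to every "undefined"
  the program meets. `User.startMachine` has the all-false stream.

  The user relation `Abs L m u` says nothing about the stream — `Core` and `TlbOK` do not mention it and the user state has no such field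
  — and the rule a proof meets at a draw (`wpUser_env`) asks for the postcondition at the value read off EVERY machine in the relation. So
  whatever `ReachVia.sound` gives for a machine in the relation it gives for that machine with any other stream, and the end statement
  (ProgX/Statement.lean: `NeverReports`, `StaysInCode`) says so:

      Machine.withUnknownBits m ub     `m` with the stream `ub`
      Abs.withUnknownBits              it is in the relation with the same user state

  The two are defined HERE, under the names they have in today's model (lean.v3/X86/Derived/User/Unknowns.lean), because the pinned tag
  does not have them. On a rebase onto a model that has that file the names collide: delete this file and import the model's.
-/
import X86.Derived.User.Abs
namespace X86

/-- `m` with the UNKNOWN stream `ub`: the same machine on a processor that answers every "undefined" with the bits of `ub`. -/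
def Machine.withUnknownBits (m : Machine) (ub : Nat → Bool) : Machine := { m with oracle := ub }

@[simp] theorem Machine.withUnknownBits_oracle (m : Machine) (ub : Nat → Bool) : (m.withUnknownBits ub).oracle = ub := rfl

/-- The stream a machine already has is one of them. -/
@[simp] theorem Machine.withUnknownBits_self (m : Machine) : m.withUnknownBits m.oracle = m := rfl

namespace User

/-- **The user relation does not see the UNKNOWN stream.** -/
theorem Abs.withUnknownBits {L : Layout} {m : Machine} {u : State} (h : Abs L m u) (ub : Nat → Bool) :
    Abs L (m.withUnknownBits ub) u := by
  obtain ⟨⟨hc, ht⟩, h1, h2, h3, h4, h5, h6⟩ := h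
  refine ⟨⟨?_, ht⟩, h1, h2, h3, h4, h5, h6⟩
  cases hc
  constructor <;> assumption

end User
end X86
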